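-- pv_equiv track=rewrite | github.com/chaseballernesbit-sys/ncaa-basketball | generate_dashboard.py | compute_nba_stats
-- ===== SOURCE A (Python) =====
-- def compute_nba_stats(picks: list) -> dict:
--     """Compute W-L records for NBA picks by type."""
--     stats = {
--         "spread": {"wins": 0, "losses": 0},
--         "ml": {"wins": 0, "losses": 0},
--     }
--
--     for p in picks:
--         if p.get("spread_correct") is True:
--             stats["spread"]["wins"] += 1
--         elif p.get("spread_correct") is False:
--             stats["spread"]["losses"] += 1
--
--         if p.get("ml_correct") is True:
--             stats["ml"]["wins"] += 1
--         elif p.get("ml_correct") is False: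
--             stats["ml"]["losses"] += 1
--
--     w = stats["spread"]["wins"] + stats["ml"]["wins"]
--     l = stats["spread"]["losses"] + stats["ml"]["losses"]
--     stats["overall"] = {"wins": w, "losses": l}
--
--     return stats
-- ===== SOURCE B (Python) =====
-- def count_field(picks, key):
--     return {
--         "wins": sum(1 for p in picks if p.get(key) is True),
--         "losses": sum(1 for p in picks if p.get(key) is False),
--     }
--
--
-- def compute_nba_stats(picks: list) -> dict:
--     """Compute W-L records for NBA picks by type."""
--     spread = count_field(picks, "spread_correct")
--     ml = count_field(picks, "ml_correct")
--     return {
--         "spread": spread,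
--         "ml": ml,
--         "overall": {
--             "wins": spread["wins"] + ml["wins"],
--             "losses": spread["losses"] + ml["losses"],
--         },
--     }
-- ===== Notes on version B (the rewrite author's own statement) =====
-- stated objective: simpler
-- what changed: Replaces the fused stateful loop mutating a nested stats dict with a reusable count_field helper that counts each outcome by a field-focused comprehension pass, assembling the result dict in one expression.
import Mathlib
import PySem

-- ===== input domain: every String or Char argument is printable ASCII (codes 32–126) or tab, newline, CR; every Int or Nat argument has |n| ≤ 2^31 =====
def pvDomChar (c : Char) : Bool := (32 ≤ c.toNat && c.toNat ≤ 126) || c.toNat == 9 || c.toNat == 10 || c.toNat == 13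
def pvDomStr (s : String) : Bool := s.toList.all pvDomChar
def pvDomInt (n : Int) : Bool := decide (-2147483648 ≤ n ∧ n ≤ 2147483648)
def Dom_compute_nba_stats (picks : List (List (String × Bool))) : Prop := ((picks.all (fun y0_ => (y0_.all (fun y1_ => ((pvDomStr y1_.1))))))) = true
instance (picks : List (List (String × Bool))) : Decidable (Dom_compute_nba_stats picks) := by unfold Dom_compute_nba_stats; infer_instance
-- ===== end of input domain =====

-- B replaces A's single fused counter-mutating loop with a reusable per-field counting helper; same return value.

-- ===== PORT A =====
-- Loop body of A: the two if/elif chains on p.get(key) updating the four counters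
-- (spread wins, spread losses, ml wins, ml losses); values are Bool, so 'is True'/'is False'
-- is exactly matching on the looked-up Bool.
def pvStepA (s : Int × Int × Int × Int) (p : List (String × Bool)) : Int × Int × Int × Int :=
  let d := PySem.Dict.mk p
  let s1 :=
    match d.get? "spread_correct" with
    | some true => (s.1 + 1, s.2.1, s.2.2.1, s.2.2.2)
    | some false => (s.1, s.2.1 + 1, s.2.2.1, s.2.2.2)
    | none => s
  match d.get? "ml_correct" with
  | some true => (s1.1, s1.2.1, s1.2.2.1 + 1, s1.2.2.2)
  | some false => (s1.1, s1.2.1, s1.2.2.1, s1.2.2.2 + 1)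
  | none => s1

def compute_nba_stats (picks : List (List (String × Bool))) : List (String × List (String × Int)) :=
  let st := picks.foldl pvStepA (0, 0, 0, 0)
  [("spread", [("wins", st.1), ("losses", st.2.1)]),
   ("ml", [("wins", st.2.2.1), ("losses", st.2.2.2)]),
   ("overall", [("wins", st.1 + st.2.2.1), ("losses", st.2.1 + st.2.2.2)])]

-- ===== PORT B =====
-- count_field: two field-focused counting passes ('sum(1 for p in picks if p.get(key) is True/False)').
def count_field (picks : List (List (String × Bool))) (key : String) : List (String × Int) :=
  [("wins", ((picks.countP (fun p => (PySem.Dict.mk p).get? key == some true) : Nat) : Int)),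
   ("losses", ((picks.countP (fun p => (PySem.Dict.mk p).get? key == some false) : Nat) : Int))]

def compute_nba_stats_alt (picks : List (List (String × Bool))) : List (String × List (String × Int)) :=
  let spread := count_field picks "spread_correct"
  let ml := count_field picks "ml_correct"
  [("spread", spread),
   ("ml", ml),
   ("overall", [("wins", (spread.lookup "wins").getD 0 + (ml.lookup "wins").getD 0),
                ("losses", (spread.lookup "losses").getD 0 + (ml.lookup "losses").getD 0)])]

-- ===== PRECONDITION & SPEC =====
def Spec_compute_nba_stats (picks : List (List (String × Bool))) (out : List (String × List (String × Int))) : Prop := out = compute_nba_stats_alt picks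
instance (picks : List (List (String × Bool))) (out : List (String × List (String × Int))) : Decidable (Spec_compute_nba_stats picks out) := by unfold Spec_compute_nba_stats; infer_instance

-- ===== CLAIM (what is proved, stated in full; the proofs are below) =====
def Claim_equal_compute_nba_stats : Prop := ∀ (picks : List (List (String × Bool))), Dom_compute_nba_stats picks → Spec_compute_nba_stats picks (compute_nba_stats picks)

-- ===== LEMMAS AND PROOFS =====

-- A's loop invariant: after folding pvStepA the four counters are the initial state
-- plus B's four per-field counts.
set_option maxRecDepth 4000 in
theorem pv_fold_counts (picks : List (List (String × Bool))) (s : Int × Int × Int × Int) :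
    picks.foldl pvStepA s
    = (s.1 + picks.countP (fun p => (PySem.Dict.mk p).get? "spread_correct" == some true),
       s.2.1 + picks.countP (fun p => (PySem.Dict.mk p).get? "spread_correct" == some false),
       s.2.2.1 + picks.countP (fun p => (PySem.Dict.mk p).get? "ml_correct" == some true),
       s.2.2.2 + picks.countP (fun p => (PySem.Dict.mk p).get? "ml_correct" == some false)) := by
  induction picks generalizing s with
  | nil => simp
  | cons p rest ih =>
    rw [List.foldl_cons, ih]
    simp only [List.countP_cons, pvStepA]
    rcases (PySem.Dict.mk p).get? "spread_correct" with _ | b <;>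
      rcases (PySem.Dict.mk p).get? "ml_correct" with _ | c <;>
      (try cases b) <;> (try cases c) <;>
      simp [Prod.ext_iff] <;> omega

-- ===== VERDICT (by name: the statement is the Claim_ definition above) =====
theorem compute_nba_stats_spec : Claim_equal_compute_nba_stats := by
  intro picks _
  show compute_nba_stats picks = compute_nba_stats_alt picks
  simp [compute_nba_stats, compute_nba_stats_alt, count_field, pv_fold_counts, List.lookup]
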